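-- pv_equiv track=rewrite | github.com/NKaty/AdventOfCode | 2018/day20/task1.py | count_doors
-- ===== SOURCE A (Python) =====
-- from collections import defaultdict
--
-- def count_doors(regex):
--     coord = 0, 0
--     shifts = {
--         'N': (-1, 0),
--         'S': (1, 0),
--         'W': (0, -1),
--         'E': (0, 1)
--     }
--     dist = defaultdict(int)
--     intersections = []
--     count = 0
--     for char in regex:
--         if char == '(':
--             intersections.append((coord, count))
--         elif char == ')':
--             coord, count = intersections.pop()
--         elif char == '|':
--             coord, count = intersections[-1]
--         else:
--             count += 1
--             coord = coord[0] + shifts[char][0], coord[1] + shifts[char][1]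
--             dist[coord] = count if not dist[coord] else min(dist[coord], count)
--     return max(dist.values())
-- ===== SOURCE B (Python) =====
-- def count_doors(regex):
--     shifts = {'N': (-1, 0), 'S': (1, 0), 'W': (0, -1), 'E': (0, 1)}
--     dist = {}
--
--     def walk(s, coord, count):
--         # consume moves and groups until an unmatched ')' or '|' or the end;
--         # return the unconsumed suffix
--         while s and s[0] != ')' and s[0] != '|':
--             if s[0] == '(':
--                 r = alts(s[1:], coord, count)
--                 s = r[1:] if r[:1] == ')' else r
--             else:
--                 count += 1
--                 coord = (coord[0] + shifts[s[0]][0], coord[1] + shifts[s[0]][1])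
--                 prev = dist.get(coord, 0)
--                 dist[coord] = count if not prev else min(prev, count)
--                 s = s[1:]
--         return s
--
--     def alts(s, coord, count):
--         # one '|'-separated alternative list; every branch starts from the same entry state
--         r = walk(s, coord, count)
--         while r[:1] == '|':
--             r = walk(r[1:], coord, count)
--         return r
--
--     walk(regex, (0, 0), 0)
--     return max(dist.values())
-- ===== Notes on version B (the rewrite author's own statement) =====
-- stated objective: alternative
-- what changed: Replaces A's single-pass state machine with an explicit intersections stack by a recursive-descent walk over string suffixes: walk consumes moves and whole groups, alts runs each branch of an alternation from the saved group-entry state, so the stack disappears into the call structure.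
import Mathlib
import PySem

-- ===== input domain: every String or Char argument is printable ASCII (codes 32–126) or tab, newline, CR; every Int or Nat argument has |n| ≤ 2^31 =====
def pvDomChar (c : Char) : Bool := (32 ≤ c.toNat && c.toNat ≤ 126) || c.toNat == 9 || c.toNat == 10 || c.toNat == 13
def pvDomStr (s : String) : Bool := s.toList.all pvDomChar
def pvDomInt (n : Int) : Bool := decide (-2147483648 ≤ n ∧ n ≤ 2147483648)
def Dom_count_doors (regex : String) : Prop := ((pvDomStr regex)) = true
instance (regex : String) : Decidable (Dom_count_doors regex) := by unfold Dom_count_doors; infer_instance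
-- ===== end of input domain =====

-- B replaces A's explicit intersection stack by a recursive-descent walk over string
-- suffixes (objective: alternative decomposition, same result; not claimed faster).

-- ===== PORT A =====
abbrev AState : Type :=
  (Int × Int) × Int × List ((Int × Int) × Int) × PySem.Dict (Int × Int) Int

-- shifts dict as a function; chars outside the move/grouping alphabet raise KeyError in A (excluded by Pre_)
def shiftsA (c : Char) : Int × Int :=
  if c = 'N' then (-1, 0)
  else if c = 'S' then (1, 0)
  else if c = 'W' then (0, -1)
  else if c = 'E' then (0, 1)
  else (0, 0)

def stepA (st : AState) (c : Char) : AState :=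
  let coord := st.1; let count := st.2.1; let inters := st.2.2.1; let dist := st.2.2.2
  if c = '(' then (coord, count, (coord, count) :: inters, dist)
  else if c = ')' then
    match inters with
    | [] => st            -- IndexError (pop from empty list) in A; excluded by Pre_
    | top :: tl => (top.1, top.2, tl, dist)
  else if c = '|' then
    match inters with
    | [] => st            -- IndexError ([-1] on empty list) in A; excluded by Pre_
    | top :: tl => (top.1, top.2, top :: tl, dist)
  else
    let sh := shiftsA c
    let coord' := (coord.1 + sh.1, coord.2 + sh.2)
    let count' := count + 1
    let prev := PySem.Dict.getD dist coord' 0   -- defaultdict(int) read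
    (coord', count', inters, PySem.Dict.insert dist coord' (if prev = 0 then count' else min prev count'))

def count_doors (regex : String) : Int :=
  let st := regex.toList.foldl stepA ((0, 0), 0, ([] : List ((Int × Int) × Int)), PySem.Dict.empty)
  -- max(dist.values()); ValueError on the empty dict in A, excluded by Pre_
  ((PySem.List.max? (PySem.Dict.values st.2.2.2) id)).getD 0

-- ===== PORT B =====
def shiftsB (c : Char) : Int × Int :=
  if c = 'N' then (-1, 0)
  else if c = 'S' then (1, 0)
  else if c = 'W' then (0, -1)
  else if c = 'E' then (0, 1)
  else (0, 0)

-- walk/alts of Source B; the fuel argument only totalizes the recursion (2*len+2 is always enough)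
mutual
def walkB : Nat → List Char → (Int × Int) → Int → PySem.Dict (Int × Int) Int →
    List Char × PySem.Dict (Int × Int) Int
  | 0, s, _, _, dist => (s, dist)
  | _ + 1, [], _, _, dist => ([], dist)
  | fuel + 1, c :: rest, coord, count, dist =>
    if c = ')' ∨ c = '|' then (c :: rest, dist)
    else if c = '(' then
      let p := altsB fuel rest coord count dist
      let r2 := match p.1 with
        | ')' :: r' => r'
        | r => r
      walkB fuel r2 coord count p.2
    else
      let sh := shiftsB c
      let coord' := (coord.1 + sh.1, coord.2 + sh.2)
      let count' := count + 1
      let prev := PySem.Dict.getD dist coord' 0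
      walkB fuel rest coord' count' (PySem.Dict.insert dist coord' (if prev = 0 then count' else min prev count'))

def altsB : Nat → List Char → (Int × Int) → Int → PySem.Dict (Int × Int) Int →
    List Char × PySem.Dict (Int × Int) Int
  | 0, s, _, _, dist => (s, dist)
  | fuel + 1, s, coord, count, dist =>
    let p := walkB fuel s coord count dist
    match p.1 with
    | '|' :: r' => altsB fuel r' coord count p.2
    | _ => p
end

def count_doors_alt (regex : String) : Int :=
  let cs := regex.toList
  let p := walkB (2 * cs.length + 2) cs (0, 0) 0 PySem.Dict.empty
  ((PySem.List.max? (PySem.Dict.values p.2) id)).getD 0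

-- ===== PRECONDITION & SPEC =====
-- syntactic well-formedness scan: d = current nesting depth
def preOkA : List Char → Nat → Bool
  | [], _ => true
  | c :: cs, d =>
    if c = '(' then preOkA cs (d + 1)
    else if c = ')' then decide (0 < d) && preOkA cs (d - 1)
    else if c = '|' then decide (0 < d) && preOkA cs d
    else (c = 'N' || c = 'S' || c = 'W' || c = 'E') && preOkA cs d

-- Pre_ is exactly A's non-raising set: every char is a move letter or a grouping symbol,
-- every branch separator / group close sits inside an open group (else A's stack pop or
-- stack peek raises IndexError), and at least one move occurs (else max() raises ValueError).
def Pre_count_doors (regex : String) : Prop :=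
  preOkA regex.toList 0 = true ∧
  regex.toList.any (fun c => c = 'N' || c = 'S' || c = 'W' || c = 'E') = true
instance (regex : String) : Decidable (Pre_count_doors regex) := by
  unfold Pre_count_doors; infer_instance

def pvWitness_count_doors : String := "E(N|S)NW"

def Spec_count_doors (regex : String) (out : Int) : Prop := out = count_doors_alt regex
instance (regex : String) (out : Int) : Decidable (Spec_count_doors regex out) := by
  unfold Spec_count_doors; infer_instance

-- ===== CLAIM (what is proved, stated in full; the proofs are below) =====
def Claim_equal_count_doors : Prop := ∀ (regex : String), Dom_count_doors regex → Pre_count_doors regex → Spec_count_doors regex (count_doors regex)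

-- ===== LEMMAS AND PROOFS =====

lemma walkB_nil (fuel : Nat) (coord : Int × Int) (count : Int) (dist : PySem.Dict (Int × Int) Int) :
    walkB fuel [] coord count dist = ([], dist) := by
  cases fuel <;> simp [walkB]

lemma stepA_paren (coord : Int × Int) (count : Int) (stack : List ((Int × Int) × Int))
    (dist : PySem.Dict (Int × Int) Int) :
    stepA (coord, count, stack, dist) '(' = (coord, count, (coord, count) :: stack, dist) := by
  simp [stepA]

lemma stepA_pop (st : AState) (top : (Int × Int) × Int) (tl : List ((Int × Int) × Int))
    (h : st.2.2.1 = top :: tl) :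
    stepA st ')' = (top.1, top.2, tl, st.2.2.2) := by
  simp [stepA, h]

lemma stepA_bar (st : AState) (top : (Int × Int) × Int) (tl : List ((Int × Int) × Int))
    (h : st.2.2.1 = top :: tl) :
    stepA st '|' = (top.1, top.2, top :: tl, st.2.2.2) := by
  simp [stepA, h]

lemma stepA_move (coord : Int × Int) (count : Int) (stack : List ((Int × Int) × Int))
    (dist : PySem.Dict (Int × Int) Int) (c : Char)
    (h1 : c ≠ '(') (h2 : c ≠ ')') (h3 : c ≠ '|') :
    stepA (coord, count, stack, dist) c =
      ((coord.1 + (shiftsA c).1, coord.2 + (shiftsA c).2), count + 1, stack,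
        PySem.Dict.insert dist (coord.1 + (shiftsA c).1, coord.2 + (shiftsA c).2)
          (if PySem.Dict.getD dist (coord.1 + (shiftsA c).1, coord.2 + (shiftsA c).2) 0 = 0
           then count + 1
           else min (PySem.Dict.getD dist (coord.1 + (shiftsA c).1, coord.2 + (shiftsA c).2) 0) (count + 1))) := by
  simp [stepA, h1, h2, h3]

lemma sim (fuel : Nat) :
    (∀ s coord count dist stack, 2 * s.length + 1 ≤ fuel →
      ∃ t, s = t ++ (walkB fuel s coord count dist).1 ∧
        (List.foldl stepA (coord, count, stack, dist) t).2.2.2 = (walkB fuel s coord count dist).2 ∧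
        ((walkB fuel s coord count dist).1 ≠ [] →
          (List.foldl stepA (coord, count, stack, dist) t).2.2.1 = stack ∧
          ((walkB fuel s coord count dist).1.head? = some ')' ∨
           (walkB fuel s coord count dist).1.head? = some '|'))) ∧
    (∀ s coord count dist stack, 2 * s.length + 2 ≤ fuel →
      ∃ t, s = t ++ (altsB fuel s coord count dist).1 ∧
        (List.foldl stepA (coord, count, (coord, count) :: stack, dist) t).2.2.2
            = (altsB fuel s coord count dist).2 ∧
        ((altsB fuel s coord count dist).1 ≠ [] →
          (List.foldl stepA (coord, count, (coord, count) :: stack, dist) t).2.2.1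
              = (coord, count) :: stack ∧
          (altsB fuel s coord count dist).1.head? = some ')')) := by
  induction fuel with
  | zero =>
    constructor <;> (intro s coord count dist stack h; omega)
  | succ f ih =>
    obtain ⟨ihW, ihA⟩ := ih
    constructor
    · -- walk
      intro s coord count dist stack hlen
      rcases s with _ | ⟨c, rest⟩
      · exact ⟨[], by simp [walkB], by simp [walkB], by simp [walkB]⟩
      by_cases hc : c = ')' ∨ c = '|'
      · refine ⟨[], by simp [walkB, hc], by simp [walkB, hc], ?_⟩
        intro _
        refine ⟨rfl, ?_⟩
        simp only [walkB, if_pos hc, List.head?_cons]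
        rcases hc with hc | hc <;> [left; right] <;> rw [hc]
      by_cases hp : c = '('
      · subst hp
        obtain ⟨t1, hsplit1, hdist1, hstop1⟩ := ihA rest coord count dist stack (by simp at hlen ⊢; omega)
        have hw : walkB (f + 1) ('(' :: rest) coord count dist
            = walkB f (match (altsB f rest coord count dist).1 with
                       | ')' :: r' => r' | r => r)
                coord count (altsB f rest coord count dist).2 := by
          simp [walkB]
        rcases hp1 : (altsB f rest coord count dist).1 with _ | ⟨c1, r1⟩
        · rw [hp1] at hw hsplit1
          rw [show (match ([] : List Char) with | ')' :: r' => r' | r => r) = ([] : List Char) from rfl,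
            walkB_nil] at hw
          refine ⟨'(' :: t1, ?_, ?_, ?_⟩
          · rw [hw]; simpa using hsplit1
          · rw [hw]
            simp only [List.foldl_cons, stepA_paren]
            simpa using hdist1
          · rw [hw]; intro hne; simp at hne
        · have hc1 : c1 = ')' := by
            have h2 := (hstop1 (by rw [hp1]; simp)).2
            rw [hp1] at h2; simpa using h2
          subst hc1
          rw [hp1] at hw
          rw [show (match (')' :: r1 : List Char) with | ')' :: r' => r' | r => r) = r1 from rfl] at hw
          have hlen1 : 2 * r1.length + 1 ≤ f := by
            have hL := congrArg List.length hsplit1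
            rw [hp1] at hL
            simp at hL hlen ⊢; omega
          obtain ⟨t2, hsplit2, hdist2, hstop2⟩ :=
            ihW r1 coord count (altsB f rest coord count dist).2 stack hlen1
          have hstack1 := hstop1 (by rw [hp1]; simp)
          -- A-side state after '(' ++ t1 :
          have hS1pop : stepA (List.foldl stepA (coord, count, (coord, count) :: stack, dist) t1) ')'
              = (coord, count, stack, (altsB f rest coord count dist).2) := by
            rw [stepA_pop _ (coord, count) stack hstack1.1, hdist1]
          have hfold : ∀ (u : List Char),
              List.foldl stepA (coord, count, stack, dist) ('(' :: t1 ++ ')' :: u)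
              = List.foldl stepA (coord, count, stack, (altsB f rest coord count dist).2) u := by
            intro u
            simp only [List.cons_append, List.foldl_cons, stepA_paren, List.foldl_append,
              List.foldl_cons]
            rw [hS1pop]
          refine ⟨'(' :: t1 ++ ')' :: t2, ?_, ?_, ?_⟩
          · rw [hw]
            simp only [List.cons_append, List.append_assoc]
            rw [← hsplit2, ← hp1, ← hsplit1]
          · rw [hw, hfold]
            exact hdist2
          · rw [hw]
            intro hne
            rw [hfold]
            exact hstop2 hne
      · -- move character
        have hc2 : c ≠ ')' ∧ c ≠ '|' := by
          constructor <;> (intro hx; exact hc (by simp [hx]))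
        have hw : walkB (f + 1) (c :: rest) coord count dist
            = walkB f rest (coord.1 + (shiftsB c).1, coord.2 + (shiftsB c).2) (count + 1)
                (PySem.Dict.insert dist (coord.1 + (shiftsB c).1, coord.2 + (shiftsB c).2)
                  (if PySem.Dict.getD dist (coord.1 + (shiftsB c).1, coord.2 + (shiftsB c).2) 0 = 0
                   then count + 1
                   else min (PySem.Dict.getD dist (coord.1 + (shiftsB c).1, coord.2 + (shiftsB c).2) 0)
                     (count + 1))) := by
          simp [walkB, hc, hp]
        obtain ⟨t2, hsplit2, hdist2, hstop2⟩ :=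
          ihW rest (coord.1 + (shiftsB c).1, coord.2 + (shiftsB c).2) (count + 1)
            (PySem.Dict.insert dist (coord.1 + (shiftsB c).1, coord.2 + (shiftsB c).2)
              (if PySem.Dict.getD dist (coord.1 + (shiftsB c).1, coord.2 + (shiftsB c).2) 0 = 0
               then count + 1
               else min (PySem.Dict.getD dist (coord.1 + (shiftsB c).1, coord.2 + (shiftsB c).2) 0)
                 (count + 1)))
            stack (by simp at hlen ⊢; omega)
        have hAB : shiftsA c = shiftsB c := rfl
        have hfold : ∀ (u : List Char),
            List.foldl stepA (coord, count, stack, dist) (c :: u)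
            = List.foldl stepA ((coord.1 + (shiftsB c).1, coord.2 + (shiftsB c).2), count + 1, stack,
                (PySem.Dict.insert dist (coord.1 + (shiftsB c).1, coord.2 + (shiftsB c).2)
                  (if PySem.Dict.getD dist (coord.1 + (shiftsB c).1, coord.2 + (shiftsB c).2) 0 = 0
                   then count + 1
                   else min (PySem.Dict.getD dist (coord.1 + (shiftsB c).1, coord.2 + (shiftsB c).2) 0)
                     (count + 1)))) u := by
          intro u
          simp only [List.foldl_cons, stepA_move coord count stack dist c hp hc2.1 hc2.2, hAB]
        refine ⟨c :: t2, ?_, ?_, ?_⟩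
        · rw [hw, List.cons_append, ← hsplit2]
        · rw [hw, hfold]; exact hdist2
        · rw [hw]; intro hne; rw [hfold]; exact hstop2 hne
    · -- alts
      intro s coord count dist stack hlen
      obtain ⟨t1, hsplit1, hdist1, hstop1⟩ :=
        ihW s coord count dist ((coord, count) :: stack) (by omega)
      have hw : altsB (f + 1) s coord count dist
          = (match (walkB f s coord count dist).1 with
             | '|' :: r' => altsB f r' coord count (walkB f s coord count dist).2
             | _ => walkB f s coord count dist) := by
        simp [altsB]
      rcases hp1 : (walkB f s coord count dist).1 with _ | ⟨c1, r1⟩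
      · rw [hp1] at hw hsplit1
        rw [show (match ([] : List Char) with
            | '|' :: r' => altsB f r' coord count (walkB f s coord count dist).2
            | _ => walkB f s coord count dist) = walkB f s coord count dist from rfl] at hw
        refine ⟨t1, ?_, ?_, ?_⟩
        · rw [hw, hp1]; exact hsplit1
        · rw [hw]; exact hdist1
        · rw [hw, hp1]; intro hne; exact absurd rfl hne
      · by_cases hbar : c1 = '|'
        · subst hbar
          rw [hp1] at hw
          rw [show (match ('|' :: r1 : List Char) with
              | '|' :: r' => altsB f r' coord count (walkB f s coord count dist).2
              | _ => walkB f s coord count dist)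
            = altsB f r1 coord count (walkB f s coord count dist).2 from rfl] at hw
          have hstack1 := hstop1 (by rw [hp1]; simp)
          have hlen1 : 2 * r1.length + 2 ≤ f := by
            have hL := congrArg List.length hsplit1
            rw [hp1] at hL
            simp at hL ⊢; omega
          obtain ⟨t2, hsplit2, hdist2, hstop2⟩ :=
            ihA r1 coord count (walkB f s coord count dist).2 stack hlen1
          have hS1bar : stepA (List.foldl stepA (coord, count, (coord, count) :: stack, dist) t1) '|'
              = (coord, count, (coord, count) :: stack, (walkB f s coord count dist).2) := by
            rw [stepA_bar _ (coord, count) stack hstack1.1, hdist1]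
          have hfold : ∀ (u : List Char),
              List.foldl stepA (coord, count, (coord, count) :: stack, dist) (t1 ++ '|' :: u)
              = List.foldl stepA (coord, count, (coord, count) :: stack,
                  (walkB f s coord count dist).2) u := by
            intro u
            simp only [List.foldl_append, List.foldl_cons]
            rw [hS1bar]
          refine ⟨t1 ++ '|' :: t2, ?_, ?_, ?_⟩
          · rw [hw]
            simp only [List.append_assoc, List.cons_append]
            rw [← hsplit2, ← hp1, ← hsplit1]
          · rw [hw, hfold]; exact hdist2
          · rw [hw]; intro hne; rw [hfold]; exact hstop2 hne
        · have hmatch : (match (c1 :: r1 : List Char) with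
              | '|' :: r' => altsB f r' coord count (walkB f s coord count dist).2
              | _ => walkB f s coord count dist) = walkB f s coord count dist := by
            split
            · rename_i r' heq
              exfalso
              apply hbar
              injection heq with h1 _
            · rfl
          rw [hp1, hmatch] at hw
          refine ⟨t1, ?_, ?_, ?_⟩
          · rw [hw, ← hsplit1]
          · rw [hw]; exact hdist1
          · rw [hw]
            intro hne
            have hh := hstop1 (by rw [hp1]; simp)
            refine ⟨hh.1, ?_⟩
            rcases hh.2 with h | h
            · exact h
            · exfalso; rw [hp1] at h; simp at h; exact hbar h


lemma preOk_split : ∀ (t r : List Char) (st : AState),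
    preOkA (t ++ r) st.2.2.1.length = true →
    preOkA r (List.foldl stepA st t).2.2.1.length = true := by
  intro t
  induction t with
  | nil => intro r st h; simpa using h
  | cons c cs ih =>
    intro r st h
    obtain ⟨coord, count, stack, dist⟩ := st
    simp only [List.cons_append, preOkA] at h
    by_cases h1 : c = '('
    · subst h1
      simp only [reduceIte] at h
      have := ih r (coord, count, (coord, count) :: stack, dist) (by simpa using h)
      simpa [stepA] using this
    · by_cases h2 : c = ')'
      · subst h2
        rcases stack with _ | ⟨top, tl⟩
        · simp at h
        · simp at h
          have := ih r (top.1, top.2, tl, dist) (by simpa using h)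
          simpa [stepA] using this
      · by_cases h3 : c = '|'
        · subst h3
          rcases stack with _ | ⟨top, tl⟩
          · simp at h
          · simp at h
            have := ih r (top.1, top.2, top :: tl, dist) (by simpa using h)
            simpa [stepA] using this
        · simp only [h1, h2, h3, if_false, Bool.and_eq_true] at h
          rcases h with ⟨-, h⟩
          have := ih r ((coord.1 + (shiftsA c).1, coord.2 + (shiftsA c).2), count + 1, stack,
            PySem.Dict.insert dist (coord.1 + (shiftsA c).1, coord.2 + (shiftsA c).2)
              (if PySem.Dict.getD dist (coord.1 + (shiftsA c).1, coord.2 + (shiftsA c).2) 0 = 0 then count + 1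
               else min (PySem.Dict.getD dist (coord.1 + (shiftsA c).1, coord.2 + (shiftsA c).2) 0) (count + 1)))
            (by simpa using h)
          simpa [stepA, h1, h2, h3] using this

-- ===== VERDICT (by name: the statement is the Claim_ definition above) =====
theorem count_doors_spec : Claim_equal_count_doors := by
  intro regex _ hpre
  unfold Spec_count_doors
  obtain ⟨hok, -⟩ := hpre
  obtain ⟨t, hsplit, hdist, hstop⟩ :=
    (sim (2 * regex.toList.length + 2)).1 regex.toList (0, 0) 0 PySem.Dict.empty [] (by omega)
  rcases hr : (walkB (2 * regex.toList.length + 2) regex.toList (0, 0) 0 PySem.Dict.empty).1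
    with _ | ⟨c, r'⟩
  · rw [hr, List.append_nil] at hsplit
    rw [← hsplit] at hdist
    simp only [count_doors, count_doors_alt]
    rw [hdist]
  · exfalso
    have h2 := hstop (by rw [hr]; exact List.cons_ne_nil c r')
    have h3 := preOk_split t (c :: r') ((0, 0), 0, [], PySem.Dict.empty) (by
      show preOkA (t ++ c :: r') (List.length []) = true
      rw [← hr, ← hsplit]
      exact hok)
    rw [h2.1] at h3
    rcases h2.2 with h | h <;>
      · rw [hr] at h
        simp at h
        subst h
        simp [preOkA] at h3
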